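-- pv_equiv track=rewrite | github.com/Dowonida/BkJn | 7677Fibonacci.py | matp
-- ===== SOURCE A (Python) =====
-- def matp(A,B):
--     a= [A[0]*B[0]+A[1]*B[2],
--                 A[0]*B[1]+A[1]*B[3],
--                 A[2]*B[0]+A[3]*B[2],
--                 A[2]*B[1]+A[3]*B[3]]
--     for i in range(4):
--         a[i]%=10000
--     return a
-- ===== SOURCE B (Python) =====
-- def matp(A, B):
--     # Strassen's algorithm for the 2x2 product: 7 multiplications instead of 8.
--     a0, a1, a2, a3 = A[0], A[1], A[2], A[3]
--     b0, b1, b2, b3 = B[0], B[1], B[2], B[3]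
--     m1 = (a0 + a3) * (b0 + b3)
--     m2 = (a2 + a3) * b0
--     m3 = a0 * (b1 - b3)
--     m4 = a3 * (b2 - b0)
--     m5 = (a0 + a1) * b3
--     m6 = (a2 - a0) * (b0 + b1)
--     m7 = (a1 - a3) * (b2 + b3)
--     return [(m1 + m4 - m5 + m7) % 10000,
--             (m3 + m5) % 10000,
--             (m2 + m4) % 10000,
--             (m1 - m2 + m3 + m6) % 10000]
-- ===== Notes on version B (the rewrite author's own statement) =====
-- stated objective: alternative
-- what changed: Replaces the naive 8-multiplication entrywise 2x2 product by Strassen's 7-multiplication scheme (m1..m7 from sums/differences of entries, entries recombined by addition), with the mod 10000 applied per result cell.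
import Mathlib
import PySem

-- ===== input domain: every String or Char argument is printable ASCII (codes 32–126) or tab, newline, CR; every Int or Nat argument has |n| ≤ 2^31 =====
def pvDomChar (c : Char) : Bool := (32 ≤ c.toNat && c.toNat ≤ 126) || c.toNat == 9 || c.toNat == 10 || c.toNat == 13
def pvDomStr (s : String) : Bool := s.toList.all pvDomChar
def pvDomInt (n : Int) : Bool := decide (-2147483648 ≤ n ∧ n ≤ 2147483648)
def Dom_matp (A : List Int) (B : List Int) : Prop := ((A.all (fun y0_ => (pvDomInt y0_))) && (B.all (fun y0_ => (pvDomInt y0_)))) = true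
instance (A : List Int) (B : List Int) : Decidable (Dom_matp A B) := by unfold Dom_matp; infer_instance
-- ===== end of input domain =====

-- B computes the 2x2 product by Strassen's 7-multiplication scheme instead of the
-- naive 8-multiplication entrywise formulas (alternative algorithm, same cost class).

-- ===== PORT A =====
def matp (A : List Int) (B : List Int) : List Int :=
  let a : List Int :=
    [PySem.List.pyGetD A 0 0 * PySem.List.pyGetD B 0 0 + PySem.List.pyGetD A 1 0 * PySem.List.pyGetD B 2 0,
     PySem.List.pyGetD A 0 0 * PySem.List.pyGetD B 1 0 + PySem.List.pyGetD A 1 0 * PySem.List.pyGetD B 3 0,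
     PySem.List.pyGetD A 2 0 * PySem.List.pyGetD B 0 0 + PySem.List.pyGetD A 3 0 * PySem.List.pyGetD B 2 0,
     PySem.List.pyGetD A 2 0 * PySem.List.pyGetD B 1 0 + PySem.List.pyGetD A 3 0 * PySem.List.pyGetD B 3 0]
  (PySem.List.pyRange 0 4 1).foldl
    (fun a i => a.set i.toNat (PySem.Int.mod (PySem.List.pyGetD a i 0) 10000)) a

-- ===== PORT B =====
def matp_alt (A : List Int) (B : List Int) : List Int :=
  let a0 := PySem.List.pyGetD A 0 0
  let a1 := PySem.List.pyGetD A 1 0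
  let a2 := PySem.List.pyGetD A 2 0
  let a3 := PySem.List.pyGetD A 3 0
  let b0 := PySem.List.pyGetD B 0 0
  let b1 := PySem.List.pyGetD B 1 0
  let b2 := PySem.List.pyGetD B 2 0
  let b3 := PySem.List.pyGetD B 3 0
  let m1 := (a0 + a3) * (b0 + b3)
  let m2 := (a2 + a3) * b0
  let m3 := a0 * (b1 - b3)
  let m4 := a3 * (b2 - b0)
  let m5 := (a0 + a1) * b3
  let m6 := (a2 - a0) * (b0 + b1)
  let m7 := (a1 - a3) * (b2 + b3)
  [PySem.Int.mod (m1 + m4 - m5 + m7) 10000,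
   PySem.Int.mod (m3 + m5) 10000,
   PySem.Int.mod (m2 + m4) 10000,
   PySem.Int.mod (m1 - m2 + m3 + m6) 10000]

-- ===== PRECONDITION & SPEC =====
-- A raises IndexError when either list has fewer than 4 elements; those inputs are excluded.
def Pre_matp (A : List Int) (B : List Int) : Prop := 4 ≤ A.length ∧ 4 ≤ B.length
instance (A : List Int) (B : List Int) : Decidable (Pre_matp A B) := by unfold Pre_matp; infer_instance
def pvWitness_matp : List Int × List Int := ([1, 2, 3, 4], [5, 6, 7, 8])

def Spec_matp (A : List Int) (B : List Int) (out : List Int) : Prop := out = matp_alt A B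
instance (A : List Int) (B : List Int) (out : List Int) : Decidable (Spec_matp A B out) := by unfold Spec_matp; infer_instance

-- ===== CLAIM (what is proved, stated in full; the proofs are below) =====
def Claim_equal_matp : Prop := ∀ (A : List Int) (B : List Int), Dom_matp A B → Pre_matp A B → Spec_matp A B (matp A B)

-- ===== LEMMAS AND PROOFS =====

-- ===== VERDICT (by name: the statement is the Claim_ definition above) =====
theorem matp_spec : Claim_equal_matp := by
  intro A B _ hpre
  obtain ⟨hA, hB⟩ := hpre
  match A, B with
  | a0 :: a1 :: a2 :: a3 :: ta, b0 :: b1 :: b2 :: b3 :: tb =>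
    unfold Spec_matp matp matp_alt
    simp only [PySem.List.pyGetD_ofNat' , PySem.List.pyRange]
    norm_num [List.range_succ, List.set, PySem.List.pyGetD, PySem.List.pyIdx?, PySem.List.pyGet?]
    norm_num [show Int.toNat 4 = 4 from rfl, show Int.toNat 3 = 3 from rfl,
      show Int.toNat 2 = 2 from rfl, show Int.toNat 1 = 1 from rfl,
      show Int.toNat 0 = 0 from rfl, List.range_succ, List.set, List.getElem?_cons]
    refine ⟨?_, ?_, ?_, ?_⟩ <;> (congr 1; ring)
  | [], _ => simp at hA
  | [_], _ => simp at hA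
  | [_, _], _ => simp at hA
  | [_, _, _], _ => simp at hA
  | _ :: _ :: _ :: _ :: _, [] => simp at hB
  | _ :: _ :: _ :: _ :: _, [_] => simp at hB
  | _ :: _ :: _ :: _ :: _, [_, _] => simp at hB
  | _ :: _ :: _ :: _ :: _, [_, _, _] => simp at hB
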